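-- pv_equiv track=rewrite | github.com/zhongxiu-xiu/python_study | oop/demo2.py | is_leap_year
-- ===== SOURCE A (Python) =====
-- def is_leap_year(start, end, future):
--     total = 0
--     year_list = []
--     for i in range(start, end):
--         if i % 4 == 0:
--             year_list.append(i)
--             total = total + 1
--             if total == future:
--                 break
--     return year_list
-- ===== SOURCE B (Python) =====
-- def is_leap_year(start, end, future):
--     first = start + (-start) % 4
--     if future > 0:
--         end = min(end, first + 4 * future)
--     return list(range(first, end, 4))
-- ===== Notes on version B (the rewrite author's own statement) =====
-- stated objective: faster
-- what changed: B computes the first multiple of 4 at or after start and builds the result directly with range(first, end, 4) plus a slice cap, instead of scanning every integer in range(start, end), filtering with i % 4 == 0 and maintaining a running counter with break.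
import Mathlib
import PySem

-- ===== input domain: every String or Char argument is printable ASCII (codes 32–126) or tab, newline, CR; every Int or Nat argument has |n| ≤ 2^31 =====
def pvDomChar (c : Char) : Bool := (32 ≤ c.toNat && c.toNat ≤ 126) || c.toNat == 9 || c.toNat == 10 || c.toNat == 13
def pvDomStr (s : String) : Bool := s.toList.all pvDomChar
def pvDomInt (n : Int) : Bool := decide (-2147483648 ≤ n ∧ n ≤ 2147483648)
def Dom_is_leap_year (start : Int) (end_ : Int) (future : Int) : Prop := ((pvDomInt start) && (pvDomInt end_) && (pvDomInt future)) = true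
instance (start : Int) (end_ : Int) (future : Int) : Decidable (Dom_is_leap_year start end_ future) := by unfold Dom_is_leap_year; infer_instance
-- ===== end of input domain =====

-- B replaces A's scan-every-integer-and-filter loop (with counter and break) by stepping
-- directly over the multiples of 4 via range(first, end, 4) and capping with a slice.

-- ===== PORT A =====
-- loop body of A: for i in range(start, end): if i % 4 == 0: append; total += 1; if total == future: break
def pvLoopA : List Int → Int → List Int → Int → List Int
  | [], _, year_list, _ => year_list
  | i :: rest, total, year_list, future =>
    if PySem.Int.mod i 4 == 0 then
      let year_list' := year_list ++ [i]
      let total' := total + 1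
      if total' == future then year_list' else pvLoopA rest total' year_list' future
    else pvLoopA rest total year_list future

def is_leap_year (start : Int) (end_ : Int) (future : Int) : List Int :=
  pvLoopA (PySem.List.pyRange start end_ 1) 0 [] future

-- ===== PORT B =====
def is_leap_year_alt (start : Int) (end_ : Int) (future : Int) : List Int :=
  let first := start + PySem.Int.mod (-start) 4
  let end2 := if future > 0 then min end_ (first + 4 * future) else end_
  PySem.List.pyRange first end2 4

-- ===== PRECONDITION & SPEC =====
def Spec_is_leap_year (start : Int) (end_ : Int) (future : Int) (out : List Int) : Prop := out = is_leap_year_alt start end_ future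
instance (start : Int) (end_ : Int) (future : Int) (out : List Int) : Decidable (Spec_is_leap_year start end_ future out) := by unfold Spec_is_leap_year; infer_instance

-- ===== CLAIM (what is proved, stated in full; the proofs are below) =====
def Claim_equal_is_leap_year : Prop := ∀ (start : Int) (end_ : Int) (future : Int), Dom_is_leap_year start end_ future → Spec_is_leap_year start end_ future (is_leap_year start end_ future)

-- ===== LEMMAS AND PROOFS =====

theorem pvMod_eq_emod (a : Int) : PySem.Int.mod a 4 = a % 4 :=
  PySem.Int.mod_eq_emod_of_pos (by norm_num)

theorem pvRange4_nil (a b : Int) (h : b ≤ a) : PySem.List.pyRange a b 4 = [] := by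
  rw [PySem.List.pyRange_of_pos a b (by norm_num)]
  rw [if_neg (by omega : ¬ a < b)]
  simp

theorem pvRange4_cons (a b : Int) (h : a < b) :
    PySem.List.pyRange a b 4 = a :: PySem.List.pyRange (a + 4) b 4 := by
  rw [PySem.List.pyRange_of_pos a b (by norm_num),
      PySem.List.pyRange_of_pos (a + 4) b (by norm_num)]
  have hn : (if a < b then ((b - a + 4 - 1) / 4).toNat else 0)
      = (if a + 4 < b then ((b - (a + 4) + 4 - 1) / 4).toNat else 0) + 1 := by
    split_ifs <;> omega
  rw [hn, List.range_succ_eq_map, List.map_cons, List.map_map]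
  congr 1
  · simp
  · apply List.map_congr_left
    intro k _
    simp only [Function.comp]
    push_cast
    ring

-- the appended accumulator can be pulled out front
theorem pvLoopA_acc (l : List Int) (total : Int) (ys : List Int) (future : Int) :
    pvLoopA l total ys future = ys ++ pvLoopA l total [] future := by
  induction l generalizing total ys with
  | nil => simp [pvLoopA]
  | cons i rest ih =>
    simp only [pvLoopA]
    by_cases hm : (PySem.Int.mod i 4 == 0) = true
    · rw [if_pos hm, if_pos hm]
      by_cases hb : (total + 1 == future) = true
      · rw [if_pos hb, if_pos hb]; simp
      · rw [if_neg hb, if_neg hb]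
        rw [ih (total + 1) (ys ++ [i]), ih (total + 1) ([] ++ [i])]
        simp
    · rw [if_neg hm, if_neg hm]
      exact ih total ys

-- A's loop result: the multiples of 4, capped at (future - total) elements when future > total
theorem pvLoopA_char (l : List Int) (total future : Int) :
    pvLoopA l total [] future =
      (if total < future then
        (l.filter (fun i => PySem.Int.mod i 4 == 0)).take (future - total).toNat
      else l.filter (fun i => PySem.Int.mod i 4 == 0)) := by
  induction l generalizing total with
  | nil => simp [pvLoopA]
  | cons i rest ih =>
    simp only [pvLoopA, List.filter_cons]
    by_cases hm : (PySem.Int.mod i 4 == 0) = true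
    · rw [if_pos hm, if_pos hm]
      by_cases hb : (total + 1 == future) = true
      · have hf : future = total + 1 := by
          have := of_decide_eq_true hb; omega
        rw [if_pos hb, if_pos (by omega : total < future)]
        have h1 : (future - total).toNat = 1 := by omega
        rw [h1, List.take_succ_cons, List.take_zero]
        simp
      · have hne : future ≠ total + 1 := fun h =>
          absurd (by simp [h] : (total + 1 == future) = true) hb
        rw [if_neg hb, pvLoopA_acc, ih (total + 1)]
        by_cases hlt : total < future
        · have hlt' : total + 1 < future := by omega
          rw [if_pos hlt', if_pos hlt]
          have ht : (future - total).toNat = (future - (total + 1)).toNat + 1 := by omega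
          rw [ht, List.take_succ_cons]
          simp
        · rw [if_neg (by omega : ¬ total + 1 < future), if_neg hlt]
          simp
    · rw [if_neg hm, if_neg hm, ih total]

-- filtering the unit-step range for multiples of 4 = the step-4 range from the first multiple
theorem pvFilter_range (n : Nat) (a b : Int) (h : (b - a).toNat ≤ n) :
    (PySem.List.pyRange a b 1).filter (fun i => PySem.Int.mod i 4 == 0)
      = PySem.List.pyRange (a + PySem.Int.mod (-a) 4) b 4 := by
  have hnn : 0 ≤ PySem.Int.mod (-a) 4 := PySem.Int.mod_nonneg (-a) (by norm_num)
  induction n generalizing a with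
  | zero =>
    have hba : b ≤ a := by omega
    rw [PySem.List.pyRange_one_eq_nil hba, pvRange4_nil _ _ (by omega)]
    simp
  | succ n ih =>
    by_cases hab : a < b
    · rw [PySem.List.pyRange_one_cons hab, List.filter_cons]
      have hrec := ih (a + 1) (by omega) (PySem.Int.mod_nonneg _ (by norm_num))
      rw [pvMod_eq_emod (-a)]
      rw [pvMod_eq_emod (-(a + 1))] at hrec
      by_cases hm : a % 4 = 0
      · have h4 : a + 1 + -(a + 1) % 4 = a + 4 := by omega
        have hz : a + -a % 4 = a := by omega
        rw [h4] at hrec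
        rw [if_pos (by simp [hm]), hrec, hz, pvRange4_cons a b hab]
      · have heq : a + 1 + -(a + 1) % 4 = a + -a % 4 := by omega
        rw [heq] at hrec
        rw [if_neg (by simp [hm]), hrec]
    · rw [PySem.List.pyRange_one_eq_nil (by omega), pvRange4_nil _ _ (by omega)]
      simp

-- taking k elements of a step-4 range = the same range with the end bound capped at a + 4*k
theorem pvRange4_take (k : Nat) (a b : Int) :
    (PySem.List.pyRange a b 4).take k = PySem.List.pyRange a (min b (a + 4 * k)) 4 := by
  induction k generalizing a with
  | zero =>
    rw [List.take_zero, pvRange4_nil _ _ (by omega)]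
  | succ k ih =>
    by_cases hab : a < b
    · have h2 : a < min b (a + 4 * ((k + 1 : Nat) : Int)) := by push_cast; omega
      rw [pvRange4_cons a b hab, List.take_succ_cons, ih (a + 4), pvRange4_cons a _ h2]
      congr 2
      push_cast
      omega
    · rw [pvRange4_nil a b (by omega), pvRange4_nil a _ (by omega), List.take_nil]

-- ===== VERDICT (by name: the statement is the Claim_ definition above) =====
theorem is_leap_year_spec : Claim_equal_is_leap_year := by
  intro start end_ future _
  unfold Spec_is_leap_year is_leap_year is_leap_year_alt
  dsimp only
  rw [pvLoopA_char, pvFilter_range (end_ - start).toNat start end_ le_rfl]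
  by_cases hf : 0 < future
  · rw [if_pos hf, if_pos hf]
    rw [Int.sub_zero, pvRange4_take]
    congr 2
    omega
  · rw [if_neg hf, if_neg hf]
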